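-- pv_equiv track=rewrite | github.com/AbhiDhariwal/Hindi-NER | CoNLL2Spacy.py | conll2spacy
-- ===== SOURCE A (Python) =====
-- def conll2spacy(data):
--     sentList = []
--     temp = []
--     startloc = 0
--     endloc = 0
--     entity = []
--
--     for word in data:
--         if word == "":# new sent
--             sent = " ".join(temp)
--             e = {'entities':entity }
--             finalSent = (sent,e)
--             sentList.append(finalSent)
--             temp = []
--             entity = []
--             startloc = 0
--             endloc = 0
--
--         else: # old sent
--             w = word.split(" ")
--             wordlen = len(w[0])
--             if w[1] == 'O': # if normal increase both loc
--                 startloc += wordlen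
--                 endloc += wordlen
--             else:# if not normal then start and end diff
--                 endloc += wordlen
--                 tup = (startloc,endloc,w[1])
--                 entity.append(tup)
--                 startloc += wordlen
--             temp.append(w[0])
--             # including space
--             startloc += 1
--             endloc += 1
--     return sentList
-- ===== SOURCE B (Python) =====
-- def conll2spacy(data):
--     # Phase 1: parse each line; "" (sentence separator) becomes None, otherwise (token, tag).
--     parsed = []
--     for line in data:
--         if line == "":
--             parsed.append(None)
--         else:
--             parts = line.split(" ")
--             parsed.append((parts[0], parts[1]))
--     # Phase 2: group parsed pairs into sentence blocks, one per separator
--     # (trailing partial block discarded).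
--     blocks = []
--     block = []
--     for item in parsed:
--         if item is None:
--             blocks.append(block)
--             block = []
--         else:
--             block.append(item)
--     # Phase 3: process each block with a single running offset.
--     result = []
--     for blk in blocks:
--         toks = []
--         ents = []
--         pos = 0
--         for tok, tag in blk:
--             if tag != 'O':
--                 ents.append((pos, pos + len(tok), tag))
--             toks.append(tok)
--             pos += len(tok) + 1
--         result.append((" ".join(toks), {'entities': ents}))
--     return result
-- ===== Notes on version B (the rewrite author's own statement) =====
-- stated objective: simpler
-- what changed: B first splits the input into sentence blocks at the "" separators and then processes each block with a single running offset, instead of A's one monolithic loop carrying two always-equal counters and in-progress sentence state.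
import Mathlib
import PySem

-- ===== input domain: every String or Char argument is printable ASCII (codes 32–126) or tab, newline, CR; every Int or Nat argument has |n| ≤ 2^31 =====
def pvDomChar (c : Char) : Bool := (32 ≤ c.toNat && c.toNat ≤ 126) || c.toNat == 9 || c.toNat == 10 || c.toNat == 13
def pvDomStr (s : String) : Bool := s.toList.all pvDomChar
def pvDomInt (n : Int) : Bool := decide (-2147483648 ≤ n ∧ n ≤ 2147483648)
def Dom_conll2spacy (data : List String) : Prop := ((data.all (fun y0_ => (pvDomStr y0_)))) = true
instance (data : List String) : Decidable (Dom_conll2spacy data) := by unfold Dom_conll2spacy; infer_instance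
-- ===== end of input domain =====

-- B splits the input into sentence blocks at the "" separators, then scans each block with one
-- running offset, instead of A's single loop carrying two always-equal counters (objective: simpler).

-- ===== PORT A =====
-- state: (sentList, temp, startloc, endloc, entity)
def conll2spacyStepA
    (st : List (String × (List (String × List (Int × Int × String)))) × List String × Int × Int × List (Int × Int × String))
    (word : String) :
    List (String × (List (String × List (Int × Int × String)))) × List String × Int × Int × List (Int × Int × String) :=
  let (sentList, temp, startloc, endloc, entity) := st
  if word = "" then
    (sentList ++ [(PySem.Str.join " " temp, [("entities", entity)])], [], 0, 0, [])
  else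
    let w := (PySem.Str.split? word " ").getD []   -- word.split(" "); sep ≠ "" so split? is some
    let wordlen := PySem.Str.len (PySem.List.pyGetD w 0 "")   -- len(w[0]); split? never yields []
    if PySem.List.pyGetD w 1 "" = "O" then          -- w[1]; Pre_ guarantees it is in range
      (sentList, temp ++ [PySem.List.pyGetD w 0 ""], startloc + wordlen + 1, endloc + wordlen + 1, entity)
    else
      (sentList, temp ++ [PySem.List.pyGetD w 0 ""],
       startloc + wordlen + 1, endloc + wordlen + 1,
       entity ++ [(startloc, endloc + wordlen, PySem.List.pyGetD w 1 "")])

def conll2spacy (data : List String) : List (String × (List (String × List (Int × Int × String)))) :=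
  (data.foldl conll2spacyStepA ([], [], 0, 0, [])).1

-- ===== PORT B =====
-- phase 1: parse each line ("" separator ↦ none, otherwise (token, tag))
def conll2spacyParse (line : String) : Option (String × String) :=
  if line = "" then none
  else
    let parts := (PySem.Str.split? line " ").getD []   -- line.split(" "); sep ≠ "" so split? is some
    some (PySem.List.pyGetD parts 0 "", PySem.List.pyGetD parts 1 "")

-- phase 2: group parsed pairs into blocks, one per separator (trailing partial block discarded)
def conll2spacyBlocks (parsed : List (Option (String × String))) : List (List (String × String)) :=
  (parsed.foldl
    (fun (st : List (List (String × String)) × List (String × String)) item =>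
      match item with
      | none => (st.1 ++ [st.2], [])
      | some p => (st.1, st.2 ++ [p]))
    ([], [])).1

-- phase 3: per-block scan, state (toks, ents, pos)
def conll2spacyStepB (st : List String × List (Int × Int × String) × Int) (p : String × String) :
    List String × List (Int × Int × String) × Int :=
  let ents := if p.2 ≠ "O" then st.2.1 ++ [(st.2.2, st.2.2 + PySem.Str.len p.1, p.2)] else st.2.1
  (st.1 ++ [p.1], ents, st.2.2 + PySem.Str.len p.1 + 1)

def conll2spacyProcBlock (blk : List (String × String)) : String × (List (String × List (Int × Int × String))) :=
  let st := blk.foldl conll2spacyStepB ([], [], 0)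
  (PySem.Str.join " " st.1, [("entities", st.2.1)])

def conll2spacy_alt (data : List String) : List (String × (List (String × List (Int × Int × String)))) :=
  ((conll2spacyBlocks (data.map conll2spacyParse)).map conll2spacyProcBlock)

-- ===== PRECONDITION & SPEC =====
-- Pre_ excludes exactly the inputs where the Pythons raise IndexError: a non-empty line
-- with no space, so that line.split(" ") has a single field and parts[1] is out of range.
def Pre_conll2spacy (data : List String) : Prop :=
  ∀ s ∈ data, s = "" ∨ ' ' ∈ s.toList

instance (data : List String) : Decidable (Pre_conll2spacy data) := by
  unfold Pre_conll2spacy; infer_instance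

def pvWitness_conll2spacy : List String := ["a O", "b PER", ""]

def Spec_conll2spacy (data : List String) (out : List (String × (List (String × List (Int × Int × String))))) : Prop := out = conll2spacy_alt data
instance (data : List String) (out : List (String × (List (String × List (Int × Int × String))))) : Decidable (Spec_conll2spacy data out) := by
  unfold Spec_conll2spacy
  -- plain infer_instance hits the instance search depth on this nested type; give the instance explicitly
  exact @List.hasDecEq _ (@instDecidableEqProd _ _ _ (@List.hasDecEq _ inferInstance)) _ _

-- ===== CLAIM (what is proved, stated in full; the proofs are below) =====
def Claim_equal_conll2spacy : Prop := ∀ (data : List String), Dom_conll2spacy data → Pre_conll2spacy data → Spec_conll2spacy data (conll2spacy data)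

-- ===== LEMMAS AND PROOFS =====

-- the interleaved split/process recursion both programs simulate
def conll2spacyMix (block : List (String × String)) :
    List (Option (String × String)) → List (String × (List (String × List (Int × Int × String))))
  | [] => []
  | none :: rest => conll2spacyProcBlock block :: conll2spacyMix [] rest
  | some p :: rest => conll2spacyMix (block ++ [p]) rest

lemma conll2spacyB_char (parsed : List (Option (String × String))) :
    ∀ out block,
      ((parsed.foldl
        (fun (st : List (List (String × String)) × List (String × String)) item =>
          match item with
          | none => (st.1 ++ [st.2], [])
          | some p => (st.1, st.2 ++ [p]))
        (out, block)).1).map conll2spacyProcBlock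
      = out.map conll2spacyProcBlock ++ conll2spacyMix block parsed := by
  induction parsed with
  | nil => intro out block; simp [conll2spacyMix]
  | cons item rest ih =>
      intro out block
      cases item with
      | none => simp [conll2spacyMix, ih]
      | some p => simp [conll2spacyMix, ih]

-- A's transition on a token line is B's transition on the parsed pair,
-- read through A's redundant twin counters
lemma conll2spacy_step_commute
    (acc : List (String × (List (String × List (Int × Int × String)))))
    (s : List String × List (Int × Int × String) × Int) (line : String) (p : String × String)
    (h : line ≠ "") (hp : conll2spacyParse line = some p) :
    conll2spacyStepA (acc, s.1, s.2.2, s.2.2, s.2.1) line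
    = (acc, (conll2spacyStepB s p).1, (conll2spacyStepB s p).2.2,
        (conll2spacyStepB s p).2.2, (conll2spacyStepB s p).2.1) := by
  obtain ⟨toks, ents, pos⟩ := s
  simp only [conll2spacyParse, if_neg h, Option.some.injEq] at hp
  subst hp
  by_cases htag : PySem.List.pyGetD ((PySem.Str.split? line " ").getD []) 1 "" = "O"
  · simp [conll2spacyStepA, conll2spacyStepB, h, htag]
  · simp [conll2spacyStepA, conll2spacyStepB, h, htag]

lemma conll2spacyA_char (data : List String) :
    ∀ (acc : List (String × (List (String × List (Int × Int × String))))) (block : List (String × String)),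
      (data.foldl conll2spacyStepA
          (acc, (block.foldl conll2spacyStepB ([], [], 0)).1,
           (block.foldl conll2spacyStepB ([], [], 0)).2.2,
           (block.foldl conll2spacyStepB ([], [], 0)).2.2,
           (block.foldl conll2spacyStepB ([], [], 0)).2.1)).1
      = acc ++ conll2spacyMix block (data.map conll2spacyParse) := by
  induction data with
  | nil => intro acc block; simp [conll2spacyMix]
  | cons line rest ih =>
      intro acc block
      by_cases h : line = ""
      · have hsep :
            conll2spacyStepA
              (acc, (block.foldl conll2spacyStepB ([], [], 0)).1,
               (block.foldl conll2spacyStepB ([], [], 0)).2.2,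
               (block.foldl conll2spacyStepB ([], [], 0)).2.2,
               (block.foldl conll2spacyStepB ([], [], 0)).2.1) line
            = (acc ++ [conll2spacyProcBlock block], ([] : List String), 0, 0,
               ([] : List (Int × Int × String))) := by
          simp [conll2spacyStepA, h, conll2spacyProcBlock]
        rw [List.map_cons, List.foldl_cons, hsep]
        have hparse : conll2spacyParse line = none := by simp [conll2spacyParse, h]
        have := ih (acc ++ [conll2spacyProcBlock block]) []
        simpa [conll2spacyMix, hparse] using this
      · have hp : conll2spacyParse line
            = some (PySem.List.pyGetD ((PySem.Str.split? line " ").getD []) 0 "",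
                    PySem.List.pyGetD ((PySem.Str.split? line " ").getD []) 1 "") := by
          simp [conll2spacyParse, h]
        set p := (PySem.List.pyGetD ((PySem.Str.split? line " ").getD []) 0 "",
                  PySem.List.pyGetD ((PySem.Str.split? line " ").getD []) 1 "") with hpdef
        have hstep : ((block ++ [p]).foldl conll2spacyStepB ([], [], 0))
            = conll2spacyStepB (block.foldl conll2spacyStepB ([], [], 0)) p := by
          rw [List.foldl_append]; rfl
        rw [List.map_cons, List.foldl_cons, conll2spacy_step_commute acc _ line p h hp, ← hstep]
        rw [ih acc (block ++ [p])]
        simp [conll2spacyMix, hp]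

-- ===== VERDICT (by name: the statement is the Claim_ definition above) =====
theorem conll2spacy_spec : Claim_equal_conll2spacy := by
  intro data _ _
  unfold Spec_conll2spacy conll2spacy conll2spacy_alt conll2spacyBlocks
  have hA := conll2spacyA_char data [] []
  have hB := conll2spacyB_char (data.map conll2spacyParse) [] []
  simpa using hA.trans (by simpa using hB.symm)
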